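-- pv_equiv track=rewrite | github.com/ksmfou98/Algorithm | programmers/소수 만들기.py | solution
-- ===== SOURCE A (Python) =====
-- from itertools import combinations
-- import math
--
-- def solution(nums):
--
--     def numCheck(n):
--         if n < 2:
--             return False
--         for i in range(2, int(math.sqrt(n)) + 1):
--             if n % i == 0:
--                 return False
--         return True
--     count = 0
--     combination = list(combinations(nums, 3))
--     for i in combination:
--
--         if numCheck(i[0] + i[1] + i[2]):
--             count += 1
--
--     return count
-- ===== SOURCE B (Python) =====
-- def solution(nums):
--     def is_prime(n):
--         if n < 2:
--             return False
--         d = 2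
--         while d * d <= n:
--             if n % d == 0:
--                 return False
--             d += 1
--         return True
--
--     tally = {}
--     rest = nums
--     while rest:
--         x, rest = rest[0], rest[1:]
--         sub = rest
--         while sub:
--             y, sub = sub[0], sub[1:]
--             for z in sub:
--                 s = x + y + z
--                 tally[s] = tally.get(s, 0) + 1
--     return sum(c for s, c in tally.items() if is_prime(s))
-- ===== Notes on version B (the rewrite author's own statement) =====
-- stated objective: alternative
-- what changed: B replaces the materialized itertools.combinations list and per-triple sqrt-bounded primality test with a suffix-loop that tallies each triple sum in a dict, testing primality (d*d<=n trial division, no sqrt) only once per distinct sum.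
import Mathlib
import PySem

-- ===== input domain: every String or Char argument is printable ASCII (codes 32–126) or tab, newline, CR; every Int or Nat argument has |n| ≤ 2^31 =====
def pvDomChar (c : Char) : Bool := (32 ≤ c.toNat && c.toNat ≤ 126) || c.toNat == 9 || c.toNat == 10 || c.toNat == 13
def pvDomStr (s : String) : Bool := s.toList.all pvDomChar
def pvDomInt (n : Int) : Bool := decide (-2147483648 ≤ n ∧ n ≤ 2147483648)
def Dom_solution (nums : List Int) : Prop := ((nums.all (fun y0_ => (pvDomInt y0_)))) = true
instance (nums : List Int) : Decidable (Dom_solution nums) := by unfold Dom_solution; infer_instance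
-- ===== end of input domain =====

-- B tallies triple sums in a dict over suffix loops and tests primality once per distinct sum
-- (trial division with d*d ≤ n instead of a sqrt bound); same return value as A.

-- ===== PORT A =====
-- numCheck: 'int(math.sqrt(n))' is Nat.sqrt here — exact for the sums reachable on Dom (|sum| < 2^33 ≪ 2^52)
def numCheckA (n : Int) : Bool :=
  if n < 2 then false
  else (PySem.List.pyRange 2 ((n.toNat.sqrt : Int) + 1) 1).all
        (fun i => !(PySem.Int.mod n i == 0))

-- list(combinations(nums, 2)) / (nums, 3) in itertools order
def comb2A : List Int → List (Int × Int)
  | [] => []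
  | x :: xs => xs.map (fun y => (x, y)) ++ comb2A xs

def comb3A : List Int → List (Int × Int × Int)
  | [] => []
  | x :: xs => (comb2A xs).map (fun p => (x, p.1, p.2)) ++ comb3A xs

def solution (nums : List Int) : Int :=
  (comb3A nums).foldl
    (fun count i => if numCheckA (i.1 + i.2.1 + i.2.2) then count + 1 else count) 0

-- ===== PORT B =====
-- 'while d * d <= n: …' ; for n ≥ 2 the Python '%' is Nat '%' on n.toNat
def primeLoopB (n d : Nat) : Bool :=
  if d * d ≤ n then (if n % d = 0 then false else primeLoopB n (d + 1)) else true
termination_by n + 2 - d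
decreasing_by
  have hd : d ≤ d * d := by
    rcases Nat.eq_zero_or_pos d with h | h
    · simp [h]
    · exact Nat.le_mul_of_pos_left d h
  omega

def isPrimeB (n : Int) : Bool :=
  if n < 2 then false else primeLoopB n.toNat 2

-- 'for z in sub: tally[s] = tally.get(s, 0) + 1'
def bumpB (d : PySem.Dict Int Int) (s : Int) : PySem.Dict Int Int :=
  d.insert s (d.getD s 0 + 1)

-- inner 'while sub:' loop (x fixed)
def tally2B (x : Int) : List Int → PySem.Dict Int Int → PySem.Dict Int Int
  | [], d => d
  | y :: sub, d => tally2B x sub (sub.foldl (fun d z => bumpB d (x + y + z)) d)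

-- outer 'while rest:' loop
def tally3B : List Int → PySem.Dict Int Int → PySem.Dict Int Int
  | [], d => d
  | x :: rest, d => tally3B rest (tally2B x rest d)

def solution_alt (nums : List Int) : Int :=
  ((tally3B nums PySem.Dict.empty).items).foldl
    (fun acc p => if isPrimeB p.1 then acc + p.2 else acc) 0

-- ===== PRECONDITION & SPEC =====
def Spec_solution (nums : List Int) (out : Int) : Prop := out = solution_alt nums
instance (nums : List Int) (out : Int) : Decidable (Spec_solution nums out) := by unfold Spec_solution; infer_instance

-- ===== CLAIM (what is proved, stated in full; the proofs are below) =====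
def Claim_equal_solution : Prop := ∀ (nums : List Int), Dom_solution nums → Spec_solution nums (solution nums)

-- ===== LEMMAS AND PROOFS =====

-- the multiset of triple sums, structurally
def pairSums : List Int → List Int
  | [] => []
  | x :: xs => xs.map (fun y => x + y) ++ pairSums xs

def tripleSums : List Int → List Int
  | [] => []
  | x :: xs => (pairSums xs).map (fun s => x + s) ++ tripleSums xs

lemma pairSums_eq_comb2 (l : List Int) :
    pairSums l = (comb2A l).map (fun p => p.1 + p.2) := by
  induction l with
  | nil => rfl
  | cons x xs ih => simp [pairSums, comb2A, ih, Function.comp]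

lemma tripleSums_eq_comb3 (l : List Int) :
    tripleSums l = (comb3A l).map (fun t => t.1 + t.2.1 + t.2.2) := by
  induction l with
  | nil => rfl
  | cons x xs ih =>
    simp only [tripleSums, comb3A, ih, pairSums_eq_comb2, List.map_append,
      List.map_map]
    congr 1
    apply List.map_congr_left
    intro p _
    simp only [Function.comp_apply]
    ring

-- A counts primes among the triple sums
lemma solution_eq_countP (nums : List Int) :
    solution nums = ((tripleSums nums).countP numCheckA : Int) := by
  rw [solution, PySem.List.foldl_if_add_one, tripleSums_eq_comb3, List.countP_map]
  simp [Function.comp_def]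

-- B's nested loops fold bumpB over the tripleSums list
lemma tally2B_eq_foldl (x : Int) (l : List Int) (d : PySem.Dict Int Int) :
    tally2B x l d = ((pairSums l).map (fun s => x + s)).foldl bumpB d := by
  induction l generalizing d with
  | nil => rfl
  | cons y sub ih =>
    simp only [tally2B, pairSums, List.map_append, List.foldl_append, List.map_map, ih]
    congr 1
    rw [List.foldl_map]
    apply PySem.List.foldl_congr_mem
    intro acc z _
    simp only [Function.comp_apply]
    rw [add_assoc]

lemma tally3B_eq_foldl (l : List Int) (d : PySem.Dict Int Int) :
    tally3B l d = (tripleSums l).foldl bumpB d := by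
  induction l generalizing d with
  | nil => rfl
  | cons x rest ih =>
    simp only [tally3B, tripleSums, List.foldl_append, ih, tally2B_eq_foldl]

lemma tally3B_eq_counter (l : List Int) :
    tally3B l PySem.Dict.empty = PySem.Dict.counter (tripleSums l) := by
  rw [tally3B_eq_foldl, ← PySem.Dict.foldl_insert_getD_add_one_eq_counter]
  rfl

-- filtered-sum-over-items fold as a sum
lemma foldl_if_add_eq_sum (g : Int → Bool) (l : List (Int × Int)) (a : Int) :
    l.foldl (fun acc p => if g p.1 then acc + p.2 else acc) a
      = a + ((l.filter (fun p => g p.1)).map (fun p => p.2)).sum := by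
  induction l generalizing a with
  | nil => simp
  | cons p t ih =>
    by_cases h : g p.1 <;> simp [h, ih] <;> ring

-- splitting a countP along a second predicate
lemma countP_split (p q : Int → Bool) (L : List Int) :
    L.countP p = L.countP (fun x => p x && q x) + L.countP (fun x => p x && !q x) := by
  induction L with
  | nil => simp
  | cons a t ih =>
    by_cases hp : p a <;> by_cases hq : q a <;>
      simp [hp, hq, ih] <;> omega

-- summing counts over the distinct elements = counting
lemma sum_counts_eq_countP (p : Int → Bool) (K L : List Int)
    (hK : K.Nodup) (hsub : ∀ x ∈ L, x ∈ K) :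
    ((K.filter p).map (fun k => (L.count k : Int))).sum = (L.countP p : Int) := by
  induction K generalizing L with
  | nil =>
    have : L = [] := by
      cases L with
      | nil => rfl
      | cons a t => exact absurd (hsub a (by simp)) (by simp)
    simp [this]
  | cons k K' ih =>
    have hk : k ∉ K' := (List.nodup_cons.mp hK).1
    have hK' : K'.Nodup := (List.nodup_cons.mp hK).2
    have hL2 : L.countP (fun x => p x && !(x == k)) = (L.filter (fun x => !(x == k))).countP p := by
      rw [List.countP_filter]
    have hL1 : (L.countP (fun x => p x && (x == k)))
        = if p k then L.count k else 0 := by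
      by_cases hp : p k
      · rw [if_pos hp, List.count]
        apply List.countP_congr
        intro x _
        by_cases hx : x = k
        · simp [hx, hp]
        · simp [hx]
      · rw [if_neg hp]
        have : L.countP (fun x => p x && (x == k)) = L.countP (fun _ => false) := by
          apply List.countP_congr
          intro x _
          by_cases hx : x = k
          · simp [hx, hp]
          · simp [hx]
        simp [this]
    have hpart := countP_split p (fun x => x == k) L
    have hcnt : ∀ k' ∈ K',
        ((L.filter (fun x => !(x == k))).count k' : Int) = (L.count k' : Int) := by
      intro k' hk'
      have hne : k' ≠ k := fun h => hk (h ▸ hk')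
      simp [List.count_filter, hne]
    have hsub' : ∀ x ∈ L.filter (fun x => !(x == k)), x ∈ K' := by
      intro x hx
      rcases List.mem_filter.mp hx with ⟨hxL, hxk⟩
      rcases List.mem_cons.mp (hsub x hxL) with h | h
      · simp [h] at hxk
      · exact h
    have hmaps : (K'.filter p).map (fun k' => (L.count k' : Int))
        = (K'.filter p).map (fun k' => ((L.filter (fun x => !(x == k))).count k' : Int)) :=
      List.map_congr_left (fun k' hk' => (hcnt k' (List.mem_filter.mp hk').1).symm)
    have hihm : ((K'.filter p).map (fun k' => (L.count k' : Int))).sum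
        = ((L.filter (fun x => !(x == k))).countP p : Int) := by
      rw [hmaps, ih (L.filter (fun x => !(x == k))) hK' hsub']
    by_cases hp : p k
    · rw [List.filter_cons_of_pos (by simp [hp]), List.map_cons, List.sum_cons, hihm]
      rw [hpart, ← hL2, hL1, if_pos hp]
      push_cast
      ring
    · rw [List.filter_cons_of_neg (by simp [hp]), hihm]
      rw [hpart, ← hL2, hL1, if_neg hp]
      push_cast
      ring

-- B = countP isPrimeB over the triple sums
lemma solution_alt_eq_countP (nums : List Int) :
    solution_alt nums = ((tripleSums nums).countP isPrimeB : Int) := by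
  rw [solution_alt, tally3B_eq_counter, foldl_if_add_eq_sum, zero_add,
      PySem.Dict.items_counter, List.filter_map, List.map_map]
  simp only [Function.comp_def]
  exact sum_counts_eq_countP isPrimeB _ _
    (PySem.Set.nodup_ofList _) (fun x hx => (PySem.Set.mem_ofList _ _).mpr hx)

-- the two primality tests agree
lemma primeLoopB_eq_true_iff (n d : Nat) :
    primeLoopB n d = true ↔ ∀ e, d ≤ e → e * e ≤ n → n % e ≠ 0 := by
  fun_induction primeLoopB n d with
  | case1 d hdd hmod =>
    constructor
    · intro hf
      exact (Bool.false_ne_true hf).elim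
    · intro h
      exact absurd hmod (h d le_rfl hdd)
  | case2 d hdd hmod ih =>
    rw [ih]
    constructor
    · intro h e hde hee
      rcases Nat.eq_or_lt_of_le hde with h1 | h1
      · subst h1; exact hmod
      · exact h e h1 hee
    · intro h e hde hee
      exact h e (by omega) hee
  | case3 d hdd =>
    constructor
    · intro _ e hde hee
      exact absurd (le_trans (Nat.mul_le_mul hde hde) hee) hdd
    · intro _
      rfl

lemma numCheckA_eq_isPrimeB (n : Int) : numCheckA n = isPrimeB n := by
  by_cases h2 : n < 2
  · simp [numCheckA, isPrimeB, h2]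
  · rw [not_lt] at h2
    have hn0 : (0:Int) ≤ n := by omega
    have hNn : ((n.toNat : Int)) = n := Int.toNat_of_nonneg hn0
    rw [numCheckA, isPrimeB, if_neg (by omega), if_neg (by omega)]
    rw [Bool.eq_iff_iff, List.all_eq_true, primeLoopB_eq_true_iff]
    constructor
    · intro h e h2e hee
      have he' : e ≤ n.toNat.sqrt := Nat.le_sqrt.mpr hee
      have hmem : (e : Int) ∈ PySem.List.pyRange 2 ((n.toNat.sqrt : Int) + 1) 1 :=
        (PySem.List.mem_pyRange_one).mpr ⟨by exact_mod_cast h2e, by exact_mod_cast (by omega : (e:Int) < (n.toNat.sqrt : Int) + 1)⟩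
      have hb := h _ hmem
      simp only [Bool.not_eq_eq_eq_not, Bool.not_true, beq_eq_false_iff_ne] at hb
      intro hmod
      apply hb
      rw [← hNn, PySem.Int.mod_natCast]
      exact_mod_cast hmod
    · intro h i hi
      rcases (PySem.List.mem_pyRange_one).mp hi with ⟨h2i, hilt⟩
      set e : Nat := i.toNat with he
      have hie : (e : Int) = i := Int.toNat_of_nonneg (by omega)
      have h2e : 2 ≤ e := by omega
      have hesq : e ≤ n.toNat.sqrt := by
        have : (e : Int) < (n.toNat.sqrt : Int) + 1 := by omega
        exact_mod_cast (by omega : (e : Int) ≤ (n.toNat.sqrt : Int))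
      have hee : e * e ≤ n.toNat := Nat.le_sqrt.mp hesq
      have hne := h e h2e hee
      simp only [Bool.not_eq_eq_eq_not, Bool.not_true, beq_eq_false_iff_ne]
      intro hmod
      apply hne
      rw [← hie, ← hNn, PySem.Int.mod_natCast] at hmod
      exact_mod_cast hmod

-- ===== VERDICT (by name: the statement is the Claim_ definition above) =====
theorem solution_spec : Claim_equal_solution := by
  intro nums _
  unfold Spec_solution
  rw [solution_eq_countP, solution_alt_eq_countP]
  congr 1
  exact List.countP_congr (fun x _ => by rw [numCheckA_eq_isPrimeB])
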